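-- pv_equiv track=rewrite | github.com/DhruvMeduri/Stadium_Seating | Set Cover/addon.py | diamond_shape
-- ===== SOURCE A (Python) =====
-- import math
--
-- def diamond_shape(uncovered,size):
--  # Input: Set of uncovered seats initially representing a square and the length of the diagonal of the diamond.
--  # Output: Returns the set of uncovered seats representing a diamond-shape theatre with given diagonal length.
--    for r in range(math.ceil(size/2)):
--        for c in range(math.ceil(size/2)):
--            if r + c < math.ceil(size/2) - 1 :
--                uncovered.remove((r*size) + c)
--                uncovered.remove((r*size) + size - 1 - c )
--                uncovered.remove(((size-r-1)*size) + c)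
--                uncovered.remove(((size-r-1)*size) + size - 1 - c)
--    return uncovered
-- ===== SOURCE B (Python) =====
-- import math
--
-- def diamond_shape(uncovered, size):
--     # One pass over the whole grid: a seat is removed exactly when its Manhattan
--     # distance from the nearest grid edge is below the diamond threshold.
--     t = math.ceil(size / 2) - 1
--     for R in range(size):
--         for C in range(size):
--             if min(R, size - 1 - R) + min(C, size - 1 - C) < t:
--                 uncovered.remove(R * size + C)
--     return uncovered
-- ===== Notes on version B (the rewrite author's own statement) =====
-- stated objective: simpler
-- what changed: B replaces A's quadrant loop with four mirrored removals per hit by a single whole-grid pass that removes a seat exactly when its Manhattan distance from the nearest edge is below the diamond threshold.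
import Mathlib
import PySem

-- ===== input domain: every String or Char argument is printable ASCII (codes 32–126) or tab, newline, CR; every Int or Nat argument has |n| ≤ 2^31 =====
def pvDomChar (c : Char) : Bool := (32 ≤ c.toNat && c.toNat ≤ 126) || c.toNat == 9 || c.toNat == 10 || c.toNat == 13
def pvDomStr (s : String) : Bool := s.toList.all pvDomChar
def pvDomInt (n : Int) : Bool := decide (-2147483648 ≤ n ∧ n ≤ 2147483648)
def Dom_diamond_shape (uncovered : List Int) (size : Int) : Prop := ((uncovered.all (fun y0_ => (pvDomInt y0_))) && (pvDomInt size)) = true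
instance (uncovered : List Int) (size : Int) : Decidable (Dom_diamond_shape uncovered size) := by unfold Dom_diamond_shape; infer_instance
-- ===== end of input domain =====

-- B replaces A's quadrant loop (four mirrored removals per hit) by one whole-grid pass with a
-- nearest-edge Manhattan-distance test; objective: simpler.  Both Pythons mutate the set in
-- place and return it; the equivalence proved here is about the returned value.

-- math.ceil(size/2): exact as integer ceiling division for |size| ≤ 2^31 (float division is exact there)
def pvCeilHalf (s : Int) : Int := PySem.Int.floordiv (s + 1) 2

-- ===== PORT A =====
-- set.remove raises KeyError on an absent element; under Pre_ every removed seat is present,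
-- where PySem.Set.discard coincides with Python's remove.
def diamond_shape (uncovered : List Int) (size : Int) : List Int :=
  (PySem.List.pyRange 0 (pvCeilHalf size) 1).foldl (fun u r =>
    (PySem.List.pyRange 0 (pvCeilHalf size) 1).foldl (fun u c =>
      if r + c < pvCeilHalf size - 1 then
        PySem.Set.discard (PySem.Set.discard (PySem.Set.discard (PySem.Set.discard u
          (r * size + c)) (r * size + size - 1 - c)) ((size - r - 1) * size + c))
          ((size - r - 1) * size + size - 1 - c)
      else u) u) uncovered

-- ===== PORT B =====
def diamond_shape_alt (uncovered : List Int) (size : Int) : List Int :=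
  (PySem.List.pyRange 0 size 1).foldl (fun u R =>
    (PySem.List.pyRange 0 size 1).foldl (fun u C =>
      if min R (size - 1 - R) + min C (size - 1 - C) < pvCeilHalf size - 1 then
        PySem.Set.discard u (R * size + C)
      else u) u) uncovered

-- ===== PRECONDITION & SPEC =====
-- Pre_ excludes exactly the inputs on which Python A raises KeyError: every seat index A
-- removes must be present in uncovered (e.g. the full square set of a size×size theatre).
-- The A-loop removes 2·h·(h−1) pairwise distinct seats (h = ⌈size/2⌉ ≥ 2), so the length
-- guard is a consequence of the membership condition; it only keeps the condition cheap to
-- decide when size is huge and excludes nothing extra.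
def pvPreB (uncovered : List Int) (size : Int) : Bool :=
  if pvCeilHalf size ≤ 1 then true
  else if 2 * pvCeilHalf size * (pvCeilHalf size - 1) ≤ (uncovered.length : Int) then
    (PySem.List.pyRange 0 (pvCeilHalf size) 1).all (fun r =>
      (PySem.List.pyRange 0 (pvCeilHalf size) 1).all (fun c =>
        if r + c < pvCeilHalf size - 1 then
          uncovered.contains (r * size + c) &&
          uncovered.contains (r * size + size - 1 - c) &&
          uncovered.contains ((size - r - 1) * size + c) &&
          uncovered.contains ((size - r - 1) * size + size - 1 - c)
        else true))
  else false

def Pre_diamond_shape (uncovered : List Int) (size : Int) : Prop :=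
  pvPreB uncovered size = true
instance (uncovered : List Int) (size : Int) : Decidable (Pre_diamond_shape uncovered size) := by
  unfold Pre_diamond_shape; infer_instance

def pvWitness_diamond_shape : List Int × Int := ([0, 1, 2, 3, 4, 5, 6, 7, 8], 3)

def Spec_diamond_shape (uncovered : List Int) (size : Int) (out : List Int) : Prop := out = diamond_shape_alt uncovered size
instance (uncovered : List Int) (size : Int) (out : List Int) : Decidable (Spec_diamond_shape uncovered size out) := by unfold Spec_diamond_shape; infer_instance

-- ===== CLAIM (what is proved, stated in full; the proofs are below) =====
def Claim_equal_diamond_shape : Prop := ∀ (uncovered : List Int) (size : Int), Dom_diamond_shape uncovered size → Pre_diamond_shape uncovered size → Spec_diamond_shape uncovered size (diamond_shape uncovered size)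

-- ===== LEMMAS AND PROOFS =====

-- both loops only ever filter the accumulator, so a fold is one filter
theorem pv_foldl_filter_shape {β : Type} (p : β → Int → Bool) :
    ∀ (l : List β) (s : List Int),
      l.foldl (fun u i => u.filter (p i)) s = s.filter (fun x => l.all (fun i => p i x)) := by
  intro l
  induction l with
  | nil => intro s; simp
  | cons i t ih =>
      intro s
      rw [List.foldl_cons, ih, List.filter_filter]
      refine List.filter_congr ?_
      intro x _
      simp [Bool.and_comm]

def pvBodyA (size r c x : Int) : Bool :=
  if r + c < pvCeilHalf size - 1 then
    (!(x == ((size - r - 1) * size + size - 1 - c)) &&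
      (!(x == ((size - r - 1) * size + c)) &&
        (!(x == (r * size + size - 1 - c)) && !(x == (r * size + c)))))
  else true

def pvBodyB (size R C x : Int) : Bool :=
  if min R (size - 1 - R) + min C (size - 1 - C) < pvCeilHalf size - 1 then
    !(x == (R * size + C))
  else true

theorem pv_stepA (size r c : Int) (u : List Int) :
    (if r + c < pvCeilHalf size - 1 then
        PySem.Set.discard (PySem.Set.discard (PySem.Set.discard (PySem.Set.discard u
          (r * size + c)) (r * size + size - 1 - c)) ((size - r - 1) * size + c))
          ((size - r - 1) * size + size - 1 - c)
      else u) = u.filter (fun x => pvBodyA size r c x) := by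
  by_cases hc : r + c < pvCeilHalf size - 1
  · simp only [if_pos hc, pvBodyA, PySem.Set.discard, List.filter_filter]
  · simp [pvBodyA, hc]

theorem pv_stepB (size R C : Int) (u : List Int) :
    (if min R (size - 1 - R) + min C (size - 1 - C) < pvCeilHalf size - 1 then
        PySem.Set.discard u (R * size + C)
      else u) = u.filter (fun x => pvBodyB size R C x) := by
  by_cases hc : min R (size - 1 - R) + min C (size - 1 - C) < pvCeilHalf size - 1
  · simp only [if_pos hc, pvBodyB, PySem.Set.discard]
  · simp [pvBodyB, hc]

theorem pv_portA (uncovered : List Int) (size : Int) :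
    diamond_shape uncovered size =
      uncovered.filter (fun x =>
        (PySem.List.pyRange 0 (pvCeilHalf size) 1).all (fun r =>
          (PySem.List.pyRange 0 (pvCeilHalf size) 1).all (fun c => pvBodyA size r c x))) := by
  unfold diamond_shape
  have hin : (fun (u : List Int) (r : Int) =>
      (PySem.List.pyRange 0 (pvCeilHalf size) 1).foldl (fun u c =>
        if r + c < pvCeilHalf size - 1 then
          PySem.Set.discard (PySem.Set.discard (PySem.Set.discard (PySem.Set.discard u
            (r * size + c)) (r * size + size - 1 - c)) ((size - r - 1) * size + c))
            ((size - r - 1) * size + size - 1 - c)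
        else u) u)
      = fun (u : List Int) (r : Int) => u.filter (fun x =>
          (PySem.List.pyRange 0 (pvCeilHalf size) 1).all (fun c => pvBodyA size r c x)) := by
    funext u r
    have hstep : (fun (u : List Int) (c : Int) =>
        if r + c < pvCeilHalf size - 1 then
          PySem.Set.discard (PySem.Set.discard (PySem.Set.discard (PySem.Set.discard u
            (r * size + c)) (r * size + size - 1 - c)) ((size - r - 1) * size + c))
            ((size - r - 1) * size + size - 1 - c)
        else u) = fun (u : List Int) (c : Int) => u.filter (fun x => pvBodyA size r c x) := by
      funext u c; exact pv_stepA size r c u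
    rw [hstep, pv_foldl_filter_shape]
  rw [hin, pv_foldl_filter_shape]

theorem pv_portB (uncovered : List Int) (size : Int) :
    diamond_shape_alt uncovered size =
      uncovered.filter (fun x =>
        (PySem.List.pyRange 0 size 1).all (fun R =>
          (PySem.List.pyRange 0 size 1).all (fun C => pvBodyB size R C x))) := by
  unfold diamond_shape_alt
  have hin : (fun (u : List Int) (R : Int) =>
      (PySem.List.pyRange 0 size 1).foldl (fun u C =>
        if min R (size - 1 - R) + min C (size - 1 - C) < pvCeilHalf size - 1 then
          PySem.Set.discard u (R * size + C)
        else u) u)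
      = fun (u : List Int) (R : Int) => u.filter (fun x =>
          (PySem.List.pyRange 0 size 1).all (fun C => pvBodyB size R C x)) := by
    funext u R
    have hstep : (fun (u : List Int) (C : Int) =>
        if min R (size - 1 - R) + min C (size - 1 - C) < pvCeilHalf size - 1 then
          PySem.Set.discard u (R * size + C)
        else u) = fun (u : List Int) (C : Int) => u.filter (fun x => pvBodyB size R C x) := by
      funext u C; exact pv_stepB size R C u
    rw [hstep, pv_foldl_filter_shape]
  rw [hin, pv_foldl_filter_shape]

theorem pvBodyA_iff (size r c x : Int) :
    pvBodyA size r c x = true ↔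
      (r + c < pvCeilHalf size - 1 →
        (x ≠ (size - r - 1) * size + size - 1 - c ∧ x ≠ (size - r - 1) * size + c ∧
         x ≠ r * size + size - 1 - c ∧ x ≠ r * size + c)) := by
  unfold pvBodyA
  split <;> simp_all

theorem pvBodyB_iff (size R C x : Int) :
    pvBodyB size R C x = true ↔
      (min R (size - 1 - R) + min C (size - 1 - C) < pvCeilHalf size - 1 →
        x ≠ R * size + C) := by
  unfold pvBodyB
  split <;> simp_all

theorem pvCeilHalf_bounds (s : Int) : 2 * pvCeilHalf s - 1 ≤ s ∧ s ≤ 2 * pvCeilHalf s := by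
  have h := (PySem.Int.floordiv_eq_iff_of_pos (a := s + 1) (b := 2)
    (q := PySem.Int.floordiv (s + 1) 2) (by norm_num)).1 rfl
  unfold pvCeilHalf
  omega

-- the seats A's quadrant loop removes are exactly the seats B's edge-distance test removes
theorem pv_key (size x : Int) :
    ((PySem.List.pyRange 0 (pvCeilHalf size) 1).all (fun r =>
        (PySem.List.pyRange 0 (pvCeilHalf size) 1).all (fun c => pvBodyA size r c x)))
    = ((PySem.List.pyRange 0 size 1).all (fun R =>
        (PySem.List.pyRange 0 size 1).all (fun C => pvBodyB size R C x))) := by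
  have hb := pvCeilHalf_bounds size
  rw [Bool.eq_iff_iff]
  simp only [List.all_eq_true, PySem.List.mem_pyRange_one, and_imp, pvBodyA_iff, pvBodyB_iff]
  constructor
  · intro hA R hR0 hRs C hC0 hCs hmin
    rcases le_total R (size - 1 - R) with hR | hR <;> rcases le_total C (size - 1 - C) with hC | hC
    · have h4 := hA R (by omega) (by omega) C (by omega) (by omega) (by omega)
      exact h4.2.2.2
    · have h4 := hA R (by omega) (by omega) (size - 1 - C) (by omega) (by omega) (by omega)
      have e : R * size + size - 1 - (size - 1 - C) = R * size + C := by ring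
      rw [e] at h4
      exact h4.2.2.1
    · have h4 := hA (size - 1 - R) (by omega) (by omega) C (by omega) (by omega) (by omega)
      have e : (size - (size - 1 - R) - 1) * size + C = R * size + C := by ring
      rw [e] at h4
      exact h4.2.1
    · have h4 := hA (size - 1 - R) (by omega) (by omega) (size - 1 - C) (by omega) (by omega)
        (by omega)
      have e : (size - (size - 1 - R) - 1) * size + size - 1 - (size - 1 - C) = R * size + C := by
        ring
      rw [e] at h4
      exact h4.1
  · intro hB r hr0 hrh c hc0 hch hsum
    refine ⟨?_, ?_, ?_, ?_⟩
    · have h := hB (size - 1 - r) (by omega) (by omega) (size - 1 - c) (by omega) (by omega)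
        (by omega)
      have e : (size - 1 - r) * size + (size - 1 - c) = (size - r - 1) * size + size - 1 - c := by
        ring
      rw [e] at h
      exact h
    · have h := hB (size - 1 - r) (by omega) (by omega) c (by omega) (by omega) (by omega)
      have e : (size - 1 - r) * size + c = (size - r - 1) * size + c := by ring
      rw [e] at h
      exact h
    · have h := hB r (by omega) (by omega) (size - 1 - c) (by omega) (by omega) (by omega)
      have e : r * size + (size - 1 - c) = r * size + size - 1 - c := by ring
      rw [e] at h
      exact h
    · exact hB r (by omega) (by omega) c (by omega) (by omega) (by omega)

-- ===== VERDICT (by name: the statement is the Claim_ definition above) =====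
theorem diamond_shape_spec : Claim_equal_diamond_shape := by
  intro uncovered size _ _
  unfold Spec_diamond_shape
  rw [pv_portA, pv_portB]
  refine List.filter_congr ?_
  intro x _
  exact pv_key size x
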